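-- pv_equiv track=rewrite | github.com/jk-jung/problem-solving | codewars/5kyu/5_Escape the Mines !.py | solve
-- ===== SOURCE A (Python) =====
-- def solve(v, s, e):
--     if s == e: return []
--     n, m = len(v), len(v[0])
--     dx = [0, 1, 0, -1]
--     dy = [1, 0, -1, 0]
--     di = ['down', 'right', 'up', 'left']
--     for i in range(4):
--         y = s['y'] + dy[i]
--         x = s['x'] + dx[i]
--         if x < 0 or y < 0 or y >= m or x >= n or not v[x][y]:
--             continue
--         v[x][y] = False
--         r = solve(v, {'x': x, 'y': y}, e)
--         v[x][y] = True
--         if isinstance(r, list):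
--             return [di[i]] + r
--     return None
-- ===== SOURCE B (Python) =====
-- def solve(v, s, e):
--     # Iterative DFS with an explicit stack of frames (x, y, next-direction index)
--     # instead of A's recursion; v is marked/restored in place exactly as A does,
--     # so v is left unchanged on return.
--     if s == e:
--         return []
--     n, m = len(v), len(v[0])
--     dy = [1, 0, -1, 0]
--     dx = [0, 1, 0, -1]
--     di = ['down', 'right', 'up', 'left']
--     stack = [[s['x'], s['y'], 0]]  # the start cell is never marked
--     path = []
--     while stack:
--         x, y, i = stack[-1]
--         if i == 4:
--             stack.pop()
--             if stack:  # a non-start frame: restore its cell and drop its direction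
--                 v[x][y] = True
--                 path.pop()
--             continue
--         stack[-1][2] = i + 1
--         ny = y + dy[i]
--         nx = x + dx[i]
--         if nx < 0 or ny < 0 or ny >= m or nx >= n or not v[nx][ny]:
--             continue
--         v[nx][ny] = False
--         path.append(di[i])
--         if {'x': nx, 'y': ny} == e:
--             v[nx][ny] = True  # restore everything we marked, as A does
--             for fx, fy, _ in stack[1:]:
--                 v[fx][fy] = True
--             return path
--         stack.append([nx, ny, 0])
--     return None
-- ===== Notes on version B (the rewrite author's own statement) =====
-- stated objective: alternative
-- what changed: B replaces A's recursive backtracking (one recursive call per step, unwinding the Python call stack) with an iterative DFS: a single while loop over an explicit stack of (x, y, next-direction-index) frames and a parallel path list, popping and restoring when a frame's directions are exhausted.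
-- outside the precondition, e.g. on solve([[True, False], [False]], {'x': 0, 'y': 0}, {'x': 5, 'y': 5}): A returns None, B returns None; on solve([], {'x': 0, 'y': 0}, {'x': 1, 'y': 1}): A raises IndexError, B raises IndexError; on solve([[True]], {}, {'x': 1, 'y': 1}): A raises KeyError, B raises KeyError
import Mathlib
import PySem

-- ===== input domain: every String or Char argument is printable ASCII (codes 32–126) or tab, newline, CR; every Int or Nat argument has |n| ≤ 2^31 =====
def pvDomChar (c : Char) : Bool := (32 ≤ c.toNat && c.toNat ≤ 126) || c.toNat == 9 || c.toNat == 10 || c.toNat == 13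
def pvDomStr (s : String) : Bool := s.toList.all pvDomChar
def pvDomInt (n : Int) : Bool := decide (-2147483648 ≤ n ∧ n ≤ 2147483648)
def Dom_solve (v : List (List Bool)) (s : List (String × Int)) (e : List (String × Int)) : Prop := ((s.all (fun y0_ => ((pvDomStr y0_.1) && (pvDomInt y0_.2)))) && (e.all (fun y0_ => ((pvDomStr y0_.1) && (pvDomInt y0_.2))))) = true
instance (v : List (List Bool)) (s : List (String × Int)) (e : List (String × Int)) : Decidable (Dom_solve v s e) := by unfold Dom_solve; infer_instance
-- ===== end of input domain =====

-- B replaces A's recursive backtracking with an iterative DFS: one while loop over an explicit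
-- stack of (x, y, next-direction-index) frames and a parallel path list; alternative decomposition,
-- not faster.  A temporarily mutates v but restores it, and B marks/restores the same cells the
-- same way, so both leave v unchanged.

-- shared Python-semantics helpers
-- Python dict equality (order-independent): same size and every entry of a is in b
def pyDictEq (a b : PySem.Dict String Int) : Bool :=
  a.size == b.size && a.items.all (fun p => b.get? p.1 == some p.2)

-- the Python dict literal {'x': x, 'y': y}
def mkXY (x y : Int) : PySem.Dict String Int :=
  (PySem.Dict.empty.insert "x" x).insert "y" y

-- v[x][y]; only evaluated after the ports checked 0 ≤ x < n, 0 ≤ y < m, so the defaults never fire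
def cellGet (v : List (List Bool)) (x y : Int) : Bool :=
  PySem.List.pyGetD (PySem.List.pyGetD v x []) y false

-- v[x][y] = False / True (in-bounds where used, so pySetD/pyGetD defaults never fire)
def setCellFalse (v : List (List Bool)) (x y : Int) : List (List Bool) :=
  PySem.List.pySetD v x (PySem.List.pySetD (PySem.List.pyGetD v x []) y false)

def setCellTrue (v : List (List Bool)) (x y : Int) : List (List Bool) :=
  PySem.List.pySetD v x (PySem.List.pySetD (PySem.List.pyGetD v x []) y true)

-- ===== PORT A =====
mutual
-- A's recursive solve; fuel only makes the recursion structural (never exhausted in Python's runs)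
def solveA : Nat → List (List Bool) → PySem.Dict String Int → PySem.Dict String Int → Option (List String)
  | fuel, v, s, e =>
    if pyDictEq s e then some [] else
    let n : Int := v.length
    let m : Int := ((PySem.List.pyGetD v 0 []).length : Int)
    let sx : Int := (s.get? "x").getD 0
    let sy : Int := (s.get? "y").getD 0
    match fuel with
    | 0 => none
    | fuel + 1 => loopA fuel v n m sx sy e [0, 1, 2, 3]
termination_by fuel _ _ _ => (fuel, 0)

-- the 'for i in range(4)' loop of A (dx = [0,1,0,-1], dy = [1,0,-1,0], di as in the source)
def loopA : Nat → List (List Bool) → Int → Int → Int → Int → PySem.Dict String Int → List Nat → Option (List String)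
  | _, _, _, _, _, _, _, [] => none
  | fuel, v, n, m, sx, sy, e, i :: rest =>
    let y : Int := sy + ([1, 0, -1, 0].getD i 0)
    let x : Int := sx + ([0, 1, 0, -1].getD i 0)
    if x < 0 ∨ y < 0 ∨ m ≤ y ∨ n ≤ x ∨ cellGet v x y = false then
      loopA fuel v n m sx sy e rest
    else
      match solveA fuel (setCellFalse v x y) (mkXY x y) e with
      | some r => some ((["down", "right", "up", "left"].getD i "") :: r)
      | none => loopA fuel v n m sx sy e rest
termination_by fuel _ _ _ _ _ _ is => (fuel, is.length + 1)
end

def solve (v : List (List Bool)) (s : List (String × Int)) (e : List (String × Int)) : Option (List String) :=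
  solveA (v.length * (PySem.List.pyGetD v 0 []).length + 1) v (PySem.Dict.ofList s) (PySem.Dict.ofList e)

-- ===== PORT B =====
-- B's while loop over the explicit stack; one recursive call = one loop iteration; the Nat fuel
-- is the usual totality idiom (the proof shows 4^(n*m+2) steps are never exhausted: result none
-- = fuel ran out, some r = the Python loop returned r).
def runB : Nat → List (List Bool) → Int → Int → PySem.Dict String Int →
    List (Int × Int × Nat) → List String → Option (Option (List String))
  | 0, _, _, _, _, _, _ => none
  | _ + 1, _, _, _, _, [], _ => some none            -- while stack: exhausted → return None
  | f + 1, v, n, m, e, (x, y, i) :: S, path =>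
    if 4 ≤ i then                                    -- frame out of directions: pop
      match S with
      | [] => runB f v n m e [] path                 -- the start frame: no cell to restore
      | _ :: _ => runB f (setCellTrue v x y) n m e S path.dropLast
    else
      let ny : Int := y + ([1, 0, -1, 0].getD i 0)
      let nx : Int := x + ([0, 1, 0, -1].getD i 0)
      if nx < 0 ∨ ny < 0 ∨ m ≤ ny ∨ n ≤ nx ∨ cellGet v nx ny = false then
        runB f v n m e ((x, y, i + 1) :: S) path
      else
        let v' := setCellFalse v nx ny
        let path' := path ++ [["down", "right", "up", "left"].getD i ""]
        if pyDictEq (mkXY nx ny) e then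
          some (some path')                          -- Source B also restores v here; the return value is path'
        else
          runB f v' n m e ((nx, ny, 0) :: (x, y, i + 1) :: S) path'

def solve_alt (v : List (List Bool)) (s : List (String × Int)) (e : List (String × Int)) : Option (List String) :=
  let sD := PySem.Dict.ofList s
  let eD := PySem.Dict.ofList e
  if pyDictEq sD eD then some [] else
  match runB (4 ^ (v.length * (PySem.List.pyGetD v 0 []).length + 2)) v (v.length : Int)
      ((PySem.List.pyGetD v 0 []).length : Int) eD
      [((sD.get? "x").getD 0, (sD.get? "y").getD 0, 0)] [] with
  | some r => r
  | none => none

-- ===== PRECONDITION & SPEC =====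
-- Pre_ excludes inputs where A raises: v == [] (IndexError on v[0]), s lacking key 'x' or 'y'
-- (KeyError) — unless s == e, where A returns [] first; and, conservatively, ragged grids whose
-- some row is shorter than the first row, since the search may index such a row (IndexError);
-- this can exclude some ragged grids whose short rows the search never actually touches.
def Pre_solve (v : List (List Bool)) (s : List (String × Int)) (e : List (String × Int)) : Prop :=
  pyDictEq (PySem.Dict.ofList s) (PySem.Dict.ofList e) = true ∨
    (v ≠ [] ∧ (∀ row ∈ v, (PySem.List.pyGetD v 0 ([] : List Bool)).length ≤ row.length) ∧
      (PySem.Dict.ofList s).contains "x" = true ∧ (PySem.Dict.ofList s).contains "y" = true)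
instance (v : List (List Bool)) (s : List (String × Int)) (e : List (String × Int)) : Decidable (Pre_solve v s e) := by unfold Pre_solve; infer_instance

def pvWitness_solve : List (List Bool) × (List (String × Int)) × (List (String × Int)) :=
  ([[true, true], [true, true]], [("x", 0), ("y", 0)], [("x", 1), ("y", 1)])

def Spec_solve (v : List (List Bool)) (s : List (String × Int)) (e : List (String × Int)) (out : Option (List String)) : Prop := out = solve_alt v s e
instance (v : List (List Bool)) (s : List (String × Int)) (e : List (String × Int)) (out : Option (List String)) : Decidable (Spec_solve v s e out) := by unfold Spec_solve; infer_instance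

-- ===== CLAIM (what is proved, stated in full; the proofs are below) =====
def Claim_equal_solve : Prop := ∀ (v : List (List Bool)) (s : List (String × Int)) (e : List (String × Int)), Dom_solve v s e → Pre_solve v s e → Spec_solve v s e (solve v s e)

-- ===== LEMMAS AND PROOFS =====

theorem mkXY_get_x (x y : Int) : ((mkXY x y).get? "x").getD 0 = x := by
  rw [mkXY, PySem.Dict.get?_insert_of_ne _ _ (by decide), PySem.Dict.get?_insert_self]
  rfl

theorem mkXY_get_y (x y : Int) : ((mkXY x y).get? "y").getD 0 = y := by
  rw [mkXY, PySem.Dict.get?_insert_self]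
  rfl

-- Nat-indexed views of the grid primitives
def vget (v : List (List Bool)) (i j : Nat) : Bool := (v.getD i []).getD j false

def vset (v : List (List Bool)) (i j : Nat) (b : Bool) : List (List Bool) :=
  v.set i ((v.getD i []).set j b)

def tc (v : List (List Bool)) : Nat :=
  (((Finset.range v.length) ×ˢ (Finset.range (PySem.List.pyGetD v 0 ([] : List Bool)).length)).filter
    (fun p => vget v p.1 p.2 = true)).card

-- rows at least as long as row 0 (what the ragged-grid part of Pre_ states)
def GoodGrid (v : List (List Bool)) : Prop :=
  ∀ row ∈ v, (PySem.List.pyGetD v 0 ([] : List Bool)).length ≤ row.length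

-- A's remaining direction list [i, …, 3]
def dirList (i : Nat) : List Nat := (List.range 4).drop i

theorem cellGet_natCast (v : List (List Bool)) (i j : Nat) :
    cellGet v (i : Int) (j : Int) = vget v i j := by
  simp [cellGet, vget]

theorem setCellFalse_natCast (v : List (List Bool)) (i j : Nat) :
    setCellFalse v (i : Int) (j : Int) = vset v i j false := by
  simp [setCellFalse, vset]

theorem setCellTrue_natCast (v : List (List Bool)) (i j : Nat) :
    setCellTrue v (i : Int) (j : Int) = vset v i j true := by
  simp [setCellTrue, vset]

theorem length_vset (v : List (List Bool)) (i j : Nat) (b : Bool) :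
    (vset v i j b).length = v.length := by simp [vset]

theorem getD_vset_self (v : List (List Bool)) (i j : Nat) (b : Bool) (hi : i < v.length) :
    (vset v i j b).getD i [] = (v.getD i []).set j b := by
  simp [vset, List.getD_eq_getElem?_getD, List.getElem?_set_self, hi]

theorem getD_vset_ne (v : List (List Bool)) (i j : Nat) (b : Bool) (a : Nat) (ha : a ≠ i) :
    (vset v i j b).getD a [] = v.getD a [] := by
  simp [vset, List.getD_eq_getElem?_getD, List.getElem?_set_ne (by omega : i ≠ a)]

theorem rowlen_vset (v : List (List Bool)) (i j : Nat) (b : Bool) (hi : i < v.length) (a : Nat) :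
    ((vset v i j b).getD a []).length = (v.getD a []).length := by
  by_cases ha : a = i
  · subst ha; rw [getD_vset_self v a j b hi]; simp
  · rw [getD_vset_ne v i j b a ha]

theorem vget_vset_self (v : List (List Bool)) (i j : Nat) (b : Bool)
    (hi : i < v.length) (hj : j < (v.getD i []).length) :
    vget (vset v i j b) i j = b := by
  rw [vget, getD_vset_self v i j b hi]
  rw [List.getD_eq_getElem?_getD, List.getElem?_set_self (by simpa using hj)]
  rfl

theorem vget_vset_ne (v : List (List Bool)) (i j : Nat) (b : Bool) (a c : Nat)
    (h : ¬ (a = i ∧ c = j)) :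
    vget (vset v i j b) a c = vget v a c := by
  by_cases ha : a = i
  · subst ha
    have hc : c ≠ j := fun hc => h ⟨rfl, hc⟩
    by_cases hi : a < v.length
    · rw [vget, getD_vset_self v a j b hi, vget]
      simp [List.getD_eq_getElem?_getD, List.getElem?_set_ne (by omega : j ≠ c)]
    · rw [vget, vget, vset, List.set_eq_of_length_le (by omega)]
  · rw [vget, getD_vset_ne v i j b a ha, vget]

theorem vset_cancel (v : List (List Bool)) (i j : Nat)
    (hi : i < v.length) (hj : j < (v.getD i []).length) (hb : vget v i j = true) :
    vset (vset v i j false) i j true = v := by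
  rw [vset, getD_vset_self v i j false hi, List.set_set, vset, List.set_set]
  have hrow : ((v.getD i []).set j true) = v.getD i [] := by
    apply List.ext_getElem
    · simp
    · intro a h1 h2
      rw [List.getElem_set]
      split_ifs with hja
      · subst hja
        have := hb
        rw [vget, List.getD_eq_getElem?_getD, List.getElem?_eq_getElem h2] at this
        simpa using this.symm
      · rfl
  rw [hrow, List.getD_eq_getElem?_getD, List.getElem?_eq_getElem hi]
  simp

theorem goodGrid_vset (v : List (List Bool)) (i j : Nat) (b : Bool) (hi : i < v.length)
    (hg : GoodGrid v) : GoodGrid (vset v i j b) := by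
  intro row hrow
  have hm0 : (PySem.List.pyGetD (vset v i j b) 0 ([] : List Bool)).length =
      (PySem.List.pyGetD v 0 ([] : List Bool)).length := by
    rw [PySem.List.pyGetD_zero, PySem.List.pyGetD_zero]
    exact rowlen_vset v i j b hi 0
  rw [hm0]
  rcases List.mem_or_eq_of_mem_set hrow with h | h
  · exact hg row h
  · subst h
    rw [List.length_set]
    refine le_trans (hg (v.getD i []) ?_) (le_refl _)
    rw [List.getD_eq_getElem?_getD, List.getElem?_eq_getElem hi]
    exact List.getElem_mem hi

theorem m0_vset (v : List (List Bool)) (i j : Nat) (b : Bool) (hi : i < v.length) :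
    (PySem.List.pyGetD (vset v i j b) 0 ([] : List Bool)).length =
      (PySem.List.pyGetD v 0 ([] : List Bool)).length := by
  rw [PySem.List.pyGetD_zero, PySem.List.pyGetD_zero]
  exact rowlen_vset v i j b hi 0

theorem tc_le (v : List (List Bool)) :
    tc v ≤ v.length * (PySem.List.pyGetD v 0 ([] : List Bool)).length := by
  calc tc v ≤ ((Finset.range v.length) ×ˢ
        (Finset.range (PySem.List.pyGetD v 0 ([] : List Bool)).length)).card :=
        Finset.card_filter_le _ _
    _ = _ := by rw [Finset.card_product, Finset.card_range, Finset.card_range]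

theorem tc_dec (v : List (List Bool)) (i j : Nat) (hg : GoodGrid v)
    (hi : i < v.length) (hj : j < (PySem.List.pyGetD v 0 ([] : List Bool)).length)
    (hb : vget v i j = true) :
    1 ≤ tc v ∧ tc (vset v i j false) = tc v - 1 := by
  have hrowmem : v.getD i [] ∈ v := by
    rw [List.getD_eq_getElem?_getD, List.getElem?_eq_getElem hi]
    exact List.getElem_mem hi
  have hrowlen : ∀ a, a < v.length → (PySem.List.pyGetD v 0 ([] : List Bool)).length ≤ (v.getD a []).length := by
    intro a ha
    refine hg (v.getD a []) ?_
    rw [List.getD_eq_getElem?_getD, List.getElem?_eq_getElem ha]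
    exact List.getElem_mem ha
  have hp0 : (i, j) ∈ ((Finset.range v.length) ×ˢ
      (Finset.range (PySem.List.pyGetD v 0 ([] : List Bool)).length)).filter
      (fun p => vget v p.1 p.2 = true) := by
    rw [Finset.mem_filter, Finset.mem_product, Finset.mem_range, Finset.mem_range]
    exact ⟨⟨hi, hj⟩, hb⟩
  constructor
  · have : 0 < (((Finset.range v.length) ×ˢ
      (Finset.range (PySem.List.pyGetD v 0 ([] : List Bool)).length)).filter
      (fun p => vget v p.1 p.2 = true)).card := Finset.card_pos.mpr ⟨(i, j), hp0⟩
    unfold tc; omega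
  · have hset : ((Finset.range (vset v i j false).length) ×ˢ
        (Finset.range (PySem.List.pyGetD (vset v i j false) 0 ([] : List Bool)).length)).filter
        (fun p => vget (vset v i j false) p.1 p.2 = true) =
        (((Finset.range v.length) ×ˢ
        (Finset.range (PySem.List.pyGetD v 0 ([] : List Bool)).length)).filter
        (fun p => vget v p.1 p.2 = true)).erase (i, j) := by
      rw [length_vset, m0_vset v i j false hi]
      ext q
      rw [Finset.mem_erase, Finset.mem_filter, Finset.mem_filter]
      constructor
      · rintro ⟨hq, hval⟩
        have hqne : q ≠ (i, j) := by
          intro hqe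
          subst hqe
          rw [vget_vset_self v i j false hi (lt_of_lt_of_le hj (hrowlen i hi))] at hval
          exact absurd hval (by simp)
        have hne' : ¬ (q.1 = i ∧ q.2 = j) := by
          intro ⟨h1, h2⟩
          exact hqne (Prod.ext h1 h2)
        rw [vget_vset_ne v i j false q.1 q.2 hne'] at hval
        exact ⟨hqne, hq, hval⟩
      · rintro ⟨hqne, hq, hval⟩
        have hne' : ¬ (q.1 = i ∧ q.2 = j) := by
          intro ⟨h1, h2⟩
          exact hqne (Prod.ext h1 h2)
        rw [vget_vset_ne v i j false q.1 q.2 hne']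
        exact ⟨hq, hval⟩
    unfold tc
    rw [hset, Finset.card_erase_of_mem hp0]

theorem dirList_zero : dirList 0 = [0, 1, 2, 3] := by decide

theorem dirList_succ (i : Nat) (h : i < 4) : dirList i = i :: dirList (i + 1) := by
  interval_cases i <;> decide

theorem solveA_succ (f : Nat) (v : List (List Bool)) (s e : PySem.Dict String Int)
    (h : pyDictEq s e = false) :
    solveA (f + 1) v s e = loopA f v (v.length : Int)
      (((PySem.List.pyGetD v 0 ([] : List Bool)).length : Nat) : Int)
      ((s.get? "x").getD 0) ((s.get? "y").getD 0) e [0, 1, 2, 3] := by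
  rw [solveA]
  simp [h]

theorem loopSim (f : Nat)
    (IH : ∀ (v : List (List Bool)) (n m x y : Int) (S : List (Int × Int × Nat))
      (path : List String) (e : PySem.Dict String Int),
      n = (v.length : Int) → m = ((PySem.List.pyGetD v 0 ([] : List Bool)).length : Int) →
      GoodGrid v → tc v < f → pyDictEq (mkXY x y) e = false →
      ∃ c, c ≤ 4 ^ (tc v + 2) - 5 ∧ ∀ g,
        runB (c + g) v n m e ((x, y, 0) :: S) path =
          match solveA f v (mkXY x y) e with
          | some rr => some (some (path ++ rr))
          | none => runB g (if S.isEmpty then v else setCellTrue v x y) n m e S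
              (if S.isEmpty then path else path.dropLast)) :
    ∀ (k i : Nat), i + k = 4 →
    ∀ (v : List (List Bool)) (n m x y : Int) (S : List (Int × Int × Nat))
      (path : List String) (e : PySem.Dict String Int),
      n = (v.length : Int) → m = ((PySem.List.pyGetD v 0 ([] : List Bool)).length : Int) →
      GoodGrid v → tc v ≤ f →
      ∃ c, c ≤ k * (4 ^ (tc v + 1) - 3) + 1 ∧ ∀ g,
        runB (c + g) v n m e ((x, y, i) :: S) path =
          match loopA f v n m x y e (dirList i) with
          | some rr => some (some (path ++ rr))
          | none => runB g (if S.isEmpty then v else setCellTrue v x y) n m e S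
              (if S.isEmpty then path else path.dropLast) := by
  intro k
  induction k with
  | zero =>
    intro i hik v n m x y S path e hn hm hg ht
    have hi4 : i = 4 := by omega
    subst hi4
    refine ⟨1, by omega, fun g => ?_⟩
    have hd : dirList 4 = [] := by decide
    rw [hd, loopA]
    have h1 : 1 + g = g + 1 := by omega
    rw [h1]
    simp only [runB, if_pos (by omega : (4:Nat) ≤ 4)]
    cases S with
    | nil => simp
    | cons a T => simp
  | succ k ihk =>
    intro i hik v n m x y S path e hn hm hg ht
    have hi4 : i < 4 := by omega
    have hX : 4 ≤ 4 ^ (tc v + 1) := by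
      calc (4:Nat) = 4 ^ 1 := by norm_num
        _ ≤ 4 ^ (tc v + 1) := Nat.pow_le_pow_right (by norm_num) (by omega)
    rw [dirList_succ i hi4, loopA]
    by_cases hc : x + ([0, 1, 0, -1].getD i 0) < 0 ∨ y + ([1, 0, -1, 0].getD i 0) < 0 ∨
        m ≤ y + ([1, 0, -1, 0].getD i 0) ∨ n ≤ x + ([0, 1, 0, -1].getD i 0) ∨
        cellGet v (x + ([0, 1, 0, -1].getD i 0)) (y + ([1, 0, -1, 0].getD i 0)) = false
    · obtain ⟨c', hc', H'⟩ := ihk (i + 1) (by omega) v n m x y S path e hn hm hg ht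
      refine ⟨1 + c', by have hmul : (k + 1) * (4 ^ (tc v + 1) - 3) = k * (4 ^ (tc v + 1) - 3) + (4 ^ (tc v + 1) - 3) := Nat.succ_mul _ _; omega, fun g => ?_⟩
      rw [if_pos hc]
      have h1 : 1 + c' + g = (c' + g) + 1 := by omega
      rw [h1]
      simp only [runB]
      rw [if_neg (by omega : ¬ (4 ≤ i)), if_pos hc]
      exact H' g
    · have hc2 := hc
      push_neg at hc2
      obtain ⟨hx0', hy0', hym', hxn', hcell'⟩ := hc2
      have hx0 : (0:Int) ≤ x + ([0, 1, 0, -1].getD i 0) := by omega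
      have hy0 : (0:Int) ≤ y + ([1, 0, -1, 0].getD i 0) := by omega
      have hcell : cellGet v (x + ([0, 1, 0, -1].getD i 0)) (y + ([1, 0, -1, 0].getD i 0)) = true := by
        revert hcell'
        cases cellGet v (x + ([0, 1, 0, -1].getD i 0)) (y + ([1, 0, -1, 0].getD i 0)) <;> simp
      set nx : Int := x + ([0, 1, 0, -1].getD i 0) with hnxdef
      set ny : Int := y + ([1, 0, -1, 0].getD i 0) with hnydef
      have hnxe : ((nx.toNat : Nat) : Int) = nx := Int.toNat_of_nonneg hx0
      have hnye : ((ny.toNat : Nat) : Int) = ny := Int.toNat_of_nonneg hy0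
      have hiv : nx.toNat < v.length := by omega
      have hjm : ny.toNat < (PySem.List.pyGetD v 0 ([] : List Bool)).length := by omega
      have hvget : vget v nx.toNat ny.toNat = true := by
        rw [← cellGet_natCast, hnxe, hnye]; exact hcell
      obtain ⟨htc1, htc2⟩ := tc_dec v nx.toNat ny.toNat hg hiv hjm hvget
      have hrowmem : v.getD nx.toNat [] ∈ v := by
        rw [List.getD_eq_getElem?_getD, List.getElem?_eq_getElem hiv]
        exact List.getElem_mem hiv
      have hrl : ny.toNat < (v.getD nx.toNat []).length :=
        lt_of_lt_of_le hjm (hg _ hrowmem)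
      rw [if_neg hc]
      have hvF : setCellFalse v nx ny = vset v nx.toNat ny.toNat false := by
        calc setCellFalse v nx ny
            = setCellFalse v ((nx.toNat : Nat) : Int) ((ny.toNat : Nat) : Int) := by
              rw [hnxe, hnye]
          _ = vset v nx.toNat ny.toNat false := setCellFalse_natCast v nx.toNat ny.toNat
      by_cases hgoal : pyDictEq (mkXY nx ny) e = true
      · refine ⟨1, by have hmul : (k + 1) * (4 ^ (tc v + 1) - 3) = k * (4 ^ (tc v + 1) - 3) + (4 ^ (tc v + 1) - 3) := Nat.succ_mul _ _; omega, fun g => ?_⟩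
        rw [show solveA f (setCellFalse v nx ny) (mkXY nx ny) e = some [] from by
          rw [solveA, if_pos hgoal]]
        have h1 : 1 + g = g + 1 := by omega
        rw [h1]
        simp only [runB]
        rw [if_neg (by omega : ¬ (4 ≤ i)), if_neg hc, if_pos hgoal]
      · have hgoal' : pyDictEq (mkXY nx ny) e = false := by
          revert hgoal; cases pyDictEq (mkXY nx ny) e <;> simp
        have hgoal2 : ¬ (pyDictEq (mkXY (x + [0, 1, 0, -1].getD i 0) (y + [1, 0, -1, 0].getD i 0)) e = true) := by
          intro h
          rw [show (pyDictEq (mkXY (x + [0, 1, 0, -1].getD i 0) (y + [1, 0, -1, 0].getD i 0)) e) = pyDictEq (mkXY nx ny) e from rfl, hgoal'] at h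
          exact absurd h (by simp)
        obtain ⟨c1, hc1, H1⟩ := IH (vset v nx.toNat ny.toNat false) n m nx ny
          ((x, y, i + 1) :: S) (path ++ [["down", "right", "up", "left"].getD i ""]) e
          (by rw [length_vset]; exact hn)
          (by rw [m0_vset v nx.toNat ny.toNat false hiv]; exact hm)
          (goodGrid_vset v nx.toNat ny.toNat false hiv hg)
          (by omega) hgoal'
        have hexp : tc (vset v nx.toNat ny.toNat false) + 2 = tc v + 1 := by omega
        rw [hexp] at hc1
        cases hA : solveA f (vset v nx.toNat ny.toNat false) (mkXY nx ny) e with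
        | some rr =>
          refine ⟨1 + c1, by have hmul : (k + 1) * (4 ^ (tc v + 1) - 3) = k * (4 ^ (tc v + 1) - 3) + (4 ^ (tc v + 1) - 3) := Nat.succ_mul _ _; omega, fun g => ?_⟩
          rw [hvF, hA]
          have h1 : 1 + c1 + g = (c1 + g) + 1 := by omega
          rw [h1]
          simp only [runB]
          rw [if_neg (by omega : ¬ (4 ≤ i)), if_neg hc, if_neg hgoal2]
          rw [hvF, H1 g, hA]
          simp
        | none =>
          obtain ⟨c2, hc2', H2⟩ := ihk (i + 1) (by omega) v n m x y S path e hn hm hg ht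
          refine ⟨1 + c1 + c2, by have hmul : (k + 1) * (4 ^ (tc v + 1) - 3) = k * (4 ^ (tc v + 1) - 3) + (4 ^ (tc v + 1) - 3) := Nat.succ_mul _ _; omega, fun g => ?_⟩
          rw [hvF, hA]
          have h1 : 1 + c1 + c2 + g = (c1 + (c2 + g)) + 1 := by omega
          rw [h1]
          simp only [runB]
          rw [if_neg (by omega : ¬ (4 ≤ i)), if_neg hc, if_neg hgoal2]
          rw [hvF, H1 (c2 + g), hA]
          simp only [List.isEmpty_cons, Bool.false_eq_true, if_false]
          have hT : setCellTrue (vset v nx.toNat ny.toNat false) nx ny = v := by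
            calc setCellTrue (vset v nx.toNat ny.toNat false) nx ny
                = setCellTrue (vset v nx.toNat ny.toNat false) ((nx.toNat : Nat) : Int)
                    ((ny.toNat : Nat) : Int) := by rw [hnxe, hnye]
              _ = vset (vset v nx.toNat ny.toNat false) nx.toNat ny.toNat true :=
                  setCellTrue_natCast _ nx.toNat ny.toNat
              _ = v := vset_cancel v nx.toNat ny.toNat hiv hrl hvget
          rw [hT]
          have hDL : (path ++ [["down", "right", "up", "left"].getD i ""]).dropLast = path := by
            simp
          rw [hDL]
          exact H2 g

theorem solveSim : ∀ (f : Nat) (v : List (List Bool)) (n m x y : Int)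
    (S : List (Int × Int × Nat)) (path : List String) (e : PySem.Dict String Int),
    n = (v.length : Int) → m = ((PySem.List.pyGetD v 0 ([] : List Bool)).length : Int) →
    GoodGrid v → tc v < f → pyDictEq (mkXY x y) e = false →
    ∃ c, c ≤ 4 ^ (tc v + 2) - 5 ∧ ∀ g,
      runB (c + g) v n m e ((x, y, 0) :: S) path =
        match solveA f v (mkXY x y) e with
        | some rr => some (some (path ++ rr))
        | none => runB g (if S.isEmpty then v else setCellTrue v x y) n m e S
            (if S.isEmpty then path else path.dropLast) := by
  intro f
  induction f with
  | zero =>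
    intro v n m x y S path e hn hm hg ht hne
    exact absurd ht (by omega)
  | succ f ihf =>
    intro v n m x y S path e hn hm hg ht hne
    obtain ⟨c, hcb, H⟩ := loopSim f ihf 4 0 rfl v n m x y S path e hn hm hg (by omega)
    have hX : 4 ≤ 4 ^ (tc v + 1) := by
      calc (4:Nat) = 4 ^ 1 := by norm_num
        _ ≤ 4 ^ (tc v + 1) := Nat.pow_le_pow_right (by norm_num) (by omega)
    have hpow : 4 ^ (tc v + 2) = 4 ^ (tc v + 1) * 4 := by rw [pow_succ]
    refine ⟨c, by omega, fun g => ?_⟩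
    rw [solveA_succ f v (mkXY x y) e hne, mkXY_get_x, mkXY_get_y, ← hn, ← hm]
    rw [← dirList_zero]
    exact H g

-- ===== VERDICT (by name: the statement is the Claim_ definition above) =====
theorem solve_spec : Claim_equal_solve := by
  unfold Claim_equal_solve
  intro v s e _ hpre
  unfold Spec_solve solve solve_alt
  by_cases he : pyDictEq (PySem.Dict.ofList s) (PySem.Dict.ofList e) = true
  · rw [solveA, if_pos he, if_pos he]
  · rcases hpre with h | ⟨hv, hgood, hx, hy⟩
    · exact absurd h he
    have hne : pyDictEq (PySem.Dict.ofList s) (PySem.Dict.ofList e) = false := by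
      revert he; cases pyDictEq (PySem.Dict.ofList s) (PySem.Dict.ofList e) <;> simp
    rw [solveA_succ _ _ _ _ hne, if_neg he]
    obtain ⟨c, hcb, H⟩ := loopSim (v.length * (PySem.List.pyGetD v 0 ([] : List Bool)).length)
      (solveSim (v.length * (PySem.List.pyGetD v 0 ([] : List Bool)).length)) 4 0 rfl
      v (v.length : Int) ((PySem.List.pyGetD v 0 ([] : List Bool)).length : Int)
      (((PySem.Dict.ofList s).get? "x").getD 0) (((PySem.Dict.ofList s).get? "y").getD 0)
      [] [] (PySem.Dict.ofList e) rfl rfl hgood (tc_le v)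
    have hX : 4 ≤ 4 ^ (tc v + 1) := by
      calc (4:Nat) = 4 ^ 1 := by norm_num
        _ ≤ 4 ^ (tc v + 1) := Nat.pow_le_pow_right (by norm_num) (by omega)
    have hpow : 4 ^ (tc v + 2) = 4 ^ (tc v + 1) * 4 := by rw [pow_succ]
    have hpow2 : 4 ^ (tc v + 2) ≤
        4 ^ (v.length * (PySem.List.pyGetD v 0 ([] : List Bool)).length + 2) :=
      Nat.pow_le_pow_right (by norm_num) (by have := tc_le v; omega)
    have hcF : c + 1 ≤ 4 ^ (v.length * (PySem.List.pyGetD v 0 ([] : List Bool)).length + 2) := by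
      omega
    have H' := H (4 ^ (v.length * (PySem.List.pyGetD v 0 ([] : List Bool)).length + 2) - c)
    rw [show c + (4 ^ (v.length * (PySem.List.pyGetD v 0 ([] : List Bool)).length + 2) - c) =
      4 ^ (v.length * (PySem.List.pyGetD v 0 ([] : List Bool)).length + 2) from by omega,
      dirList_zero] at H'
    cases hL : loopA (v.length * (PySem.List.pyGetD v 0 ([] : List Bool)).length) v
        (v.length : Int) ((PySem.List.pyGetD v 0 ([] : List Bool)).length : Int)
        (((PySem.Dict.ofList s).get? "x").getD 0) (((PySem.Dict.ofList s).get? "y").getD 0)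
        (PySem.Dict.ofList e) [0, 1, 2, 3] with
    | none =>
      rw [hL] at H'
      simp only [List.isEmpty_nil, if_pos] at H'
      obtain ⟨g', hg'⟩ : ∃ g',
          4 ^ (v.length * (PySem.List.pyGetD v 0 ([] : List Bool)).length + 2) - c = g' + 1 :=
        ⟨4 ^ (v.length * (PySem.List.pyGetD v 0 ([] : List Bool)).length + 2) - c - 1, by omega⟩
      rw [hg'] at H'
      rw [H']
      rfl
    | some rr =>
      rw [hL] at H'
      rw [H']
      simp
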